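-- pv_equiv track=rewrite | github.com/nicepyprod/csv-surgeon | csv_surgeon/shift.py | lag_column
-- ===== SOURCE A (Python) =====
-- from typing import Iterator, Dict, List, Optional
-- from collections import deque
--
-- def lag_column(
--     rows: Iterator[Dict[str, str]],
--     column: str,
--     periods: int = 1,
--     out_column: Optional[str] = None,
--     fill: str = "",
-- ) -> Iterator[Dict[str, str]]:
--     """Add a column containing the value of *column* from *periods* rows ago."""
--     if periods < 1:
--         raise ValueError("periods must be >= 1")
--     out = out_column or f"{column}_lag{periods}"
--     buf: deque = deque()
--     for row in rows:
--         buf.append(row.get(column, ""))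
--         lagged = buf[0] if len(buf) > periods else fill
--         if len(buf) > periods:
--             buf.popleft()
--         yield {**row, out: lagged}
-- ===== SOURCE B (Python) =====
-- from itertools import tee, chain, repeat
--
-- def lag_column(rows, column, periods=1, out_column=None, fill=""):
--     """Add a column containing the value of *column* from *periods* rows ago."""
--     if periods < 1:
--         raise ValueError("periods must be >= 1")
--     out = out_column or f"{column}_lag{periods}"
--     r1, r2 = tee(rows)
--     vals = chain(repeat(fill, periods), (row.get(column, "") for row in r2))
--     for row, lagged in zip(r1, vals):
--         yield {**row, out: lagged}
-- ===== Notes on version B (the rewrite author's own statement) =====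
-- stated objective: idiomatic
-- what changed: Replaced the manual deque buffer and per-row popleft bookkeeping with an itertools pipeline: the lagged stream is repeat(fill, periods) chained with the column values, zipped against the rows.
import Mathlib
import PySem

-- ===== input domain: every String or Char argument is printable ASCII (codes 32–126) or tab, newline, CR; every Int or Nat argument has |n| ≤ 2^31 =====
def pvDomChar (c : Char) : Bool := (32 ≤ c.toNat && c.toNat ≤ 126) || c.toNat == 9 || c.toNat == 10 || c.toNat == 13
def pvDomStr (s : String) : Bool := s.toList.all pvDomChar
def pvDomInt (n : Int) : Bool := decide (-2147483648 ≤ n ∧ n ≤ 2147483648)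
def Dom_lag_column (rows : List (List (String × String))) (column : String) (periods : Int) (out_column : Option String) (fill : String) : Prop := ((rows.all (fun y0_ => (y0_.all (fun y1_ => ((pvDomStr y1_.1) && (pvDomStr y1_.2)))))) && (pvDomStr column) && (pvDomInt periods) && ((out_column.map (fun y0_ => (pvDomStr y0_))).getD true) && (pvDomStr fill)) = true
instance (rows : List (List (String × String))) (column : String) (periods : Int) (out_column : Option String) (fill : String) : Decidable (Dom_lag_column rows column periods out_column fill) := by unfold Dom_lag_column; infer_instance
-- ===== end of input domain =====

-- B re-expresses the lag as zipping rows with a fill-padded value stream instead of A's manual deque bookkeeping (idiomatic itertools pipeline, same O(n) cost).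
-- Both A and B are generators; Pre_ excludes periods < 1, where both raise ValueError.

-- ===== PORT A =====
-- out = out_column or f"{column}_lag{periods}"  (falsy: None or "")
def pvOutName (column : String) (periods : Int) (out_column : Option String) : String :=
  match out_column with
  | some s => if s = "" then String.ofList (column.toList ++ "_lag".toList ++ (PySem.Int.toStr periods).toList) else s
  | none => String.ofList (column.toList ++ "_lag".toList ++ (PySem.Int.toStr periods).toList)

-- A's loop: buf is the deque of column values (append right, popleft)
def lagLoopA (out column : String) (periods : Int) (fill : String)
    (rows : List (List (String × String))) (buf : List String) : List (List (String × String)) :=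
  match rows with
  | [] => []
  | row :: rest =>
    let d := PySem.Dict.mk row
    let buf1 := buf ++ [d.getD column ""]
    let lagged := if (buf1.length : Int) > periods then buf1.headD "" else fill
    let buf2 := if (buf1.length : Int) > periods then buf1.tail else buf1
    (d.insert out lagged).items :: lagLoopA out column periods fill rest buf2

def lag_column (rows : List (List (String × String))) (column : String) (periods : Int) (out_column : Option String) (fill : String) : List (List (String × String)) :=
  let out := pvOutName column periods out_column
  lagLoopA out column periods fill rows []

-- ===== PORT B =====
-- tee/chain/repeat/zip pipeline: vals = fills then the column values; zip truncates to rows.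
-- repeat(fill, periods) is consumed lazily — zip reads at most len(rows) values from it,
-- so the materialized prefix is min(periods, len(rows)) fills (exact: the extra fills are never read).
def lag_column_alt (rows : List (List (String × String))) (column : String) (periods : Int) (out_column : Option String) (fill : String) : List (List (String × String)) :=
  let out := pvOutName column periods out_column
  let vals := List.replicate (min periods.toNat rows.length) fill ++ rows.map (fun r => (PySem.Dict.mk r).getD column "")
  (rows.zip vals).map (fun p => ((PySem.Dict.mk p.1).insert out p.2).items)

-- ===== PRECONDITION & SPEC =====
-- A (and B) raise ValueError when periods < 1
def Pre_lag_column (rows : List (List (String × String))) (column : String) (periods : Int) (out_column : Option String) (fill : String) : Prop := 1 ≤ periods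
instance (rows : List (List (String × String))) (column : String) (periods : Int) (out_column : Option String) (fill : String) : Decidable (Pre_lag_column rows column periods out_column fill) := by unfold Pre_lag_column; infer_instance

def pvWitness_lag_column : (List (List (String × String))) × String × Int × Option String × String :=
  ([[("a", "1"), ("b", "x")], [("a", "2")]], "a", 1, none, "")

def Spec_lag_column (rows : List (List (String × String))) (column : String) (periods : Int) (out_column : Option String) (fill : String) (out : List (List (String × String))) : Prop := out = lag_column_alt rows column periods out_column fill
instance (rows : List (List (String × String))) (column : String) (periods : Int) (out_column : Option String) (fill : String) (out : List (List (String × String))) : Decidable (Spec_lag_column rows column periods out_column fill out) := by unfold Spec_lag_column; infer_instance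

-- ===== CLAIM (what is proved, stated in full; the proofs are below) =====
def Claim_equal_lag_column : Prop := ∀ (rows : List (List (String × String))) (column : String) (periods : Int) (out_column : Option String) (fill : String), Dom_lag_column rows column periods out_column fill → Pre_lag_column rows column periods out_column fill → Spec_lag_column rows column periods out_column fill (lag_column rows column periods out_column fill)

-- ===== LEMMAS AND PROOFS =====

-- Invariant: with at most `p` buffered values, A's loop equals B's zip
-- against the padded stream 'fills ++ buf ++ future column values'.
lemma lagLoopA_eq_zip (out column fill : String) (p : Nat)
    (rows : List (List (String × String))) (buf : List String)
    (hb : buf.length ≤ p) :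
    lagLoopA out column (p : Int) fill rows buf =
      (rows.zip (List.replicate (p - buf.length) fill ++ buf ++
          rows.map (fun r => (PySem.Dict.mk r).getD column ""))).map
        (fun q => ((PySem.Dict.mk q.1).insert out q.2).items) := by
  induction rows generalizing buf with
  | nil => simp [lagLoopA]
  | cons row rest ih =>
    simp only [lagLoopA, List.map_cons]
    by_cases h : buf.length = p
    · have hg : ((buf ++ [(PySem.Dict.mk row).getD column ""]).length : Int) > (p : Int) := by
        simp only [List.length_append, List.length_singleton]; omega
      rw [if_pos hg, if_pos hg]
      cases buf with
      | nil =>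
        have hp0 : p = 0 := by simp only [List.length_nil] at h; omega
        subst hp0
        simp only [List.nil_append, List.headD_cons, List.tail_cons, Nat.sub_self,
          List.replicate_zero, List.length_nil, List.zip_cons_cons, List.map_cons]
        refine congrArg _ ?_
        have := ih [] (by simp)
        simpa using this
      | cons b bs =>
        have hk : p - (b :: bs).length = 0 := by simp only [List.length_cons] at h ⊢; omega
        simp only [hk, List.replicate_zero, List.nil_append, List.cons_append,
          List.headD_cons, List.tail_cons, List.zip_cons_cons, List.map_cons]
        refine congrArg _ ?_
        have hb2 : (bs ++ [(PySem.Dict.mk row).getD column ""]).length ≤ p := by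
          simp only [List.length_append, List.length_singleton]
          simp only [List.length_cons] at h; omega
        rw [ih (bs ++ [(PySem.Dict.mk row).getD column ""]) hb2]
        have hk2 : p - (bs ++ [(PySem.Dict.mk row).getD column ""]).length = 0 := by
          simp only [List.length_append, List.length_singleton]
          simp only [List.length_cons] at h; omega
        rw [hk2]
        simp only [List.replicate_zero, List.nil_append, List.append_assoc,
          List.cons_append, List.nil_append]
    · -- fill branch: buffer still short
      have hg : ¬ ((buf ++ [(PySem.Dict.mk row).getD column ""]).length : Int) > (p : Int) := by
        simp only [List.length_append, List.length_singleton]; omega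
      rw [if_neg hg, if_neg hg]
      obtain ⟨k, hkk⟩ : ∃ k, p - buf.length = k + 1 := ⟨p - buf.length - 1, by omega⟩
      rw [hkk]
      simp only [List.replicate_succ, List.cons_append, List.zip_cons_cons, List.map_cons]
      refine congrArg _ ?_
      have hb2 : (buf ++ [(PySem.Dict.mk row).getD column ""]).length ≤ p := by
        simp only [List.length_append, List.length_singleton]; omega
      rw [ih (buf ++ [(PySem.Dict.mk row).getD column ""]) hb2]
      have hk2 : p - (buf ++ [(PySem.Dict.mk row).getD column ""]).length = k := by
        simp only [List.length_append, List.length_singleton]; omega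
      rw [hk2]
      simp only [List.append_assoc, List.cons_append, List.nil_append]

-- zip only reads the first xs.length elements of its second argument
lemma zip_take_congr {α β : Type} (xs : List α) (ys zs : List β)
    (h : ys.take xs.length = zs.take xs.length) : xs.zip ys = xs.zip zs := by
  induction xs generalizing ys zs with
  | nil => simp
  | cons x xt ih =>
    cases ys with
    | nil =>
      cases zs with
      | nil => rfl
      | cons z zt => simp at h
    | cons y yt =>
      cases zs with
      | nil => simp at h
      | cons z zt =>
        simp only [List.length_cons, List.take_succ_cons, List.cons.injEq] at h
        simp only [List.zip_cons_cons, h.1, List.cons.injEq, true_and]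
        exact ih yt zt h.2

-- the lazily-consumed fill prefix agrees with the full one under zip
lemma zip_replicate_min {α β : Type} (xs : List α) (p : Nat) (fill : β) (tail : List β) :
    xs.zip (List.replicate (min p xs.length) fill ++ tail) =
      xs.zip (List.replicate p fill ++ tail) := by
  apply zip_take_congr
  rw [List.take_append, List.take_append,
    List.take_replicate, List.take_replicate, List.length_replicate, List.length_replicate]
  have e1 : min xs.length (min p xs.length) = min xs.length p := by omega
  have e2 : xs.length - min p xs.length = xs.length - p := by omega
  rw [e1, e2]

-- ===== VERDICT (by name: the statement is the Claim_ definition above) =====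
theorem lag_column_spec : Claim_equal_lag_column := by
  intro rows column periods out_column fill _ hpre
  unfold Spec_lag_column lag_column lag_column_alt
  have hcast : ((periods.toNat : Int)) = periods := Int.toNat_of_nonneg (by exact le_trans (by norm_num) hpre)
  have := lagLoopA_eq_zip (pvOutName column periods out_column) column fill periods.toNat rows [] (by simp)
  rw [hcast] at this
  simp only [List.length_nil, Nat.sub_zero, List.append_nil] at this
  show lagLoopA (pvOutName column periods out_column) column periods fill rows [] =
    List.map (fun q => ((PySem.Dict.mk q.1).insert (pvOutName column periods out_column) q.2).items)
      (rows.zip (List.replicate (min periods.toNat rows.length) fill ++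
        rows.map (fun r => (PySem.Dict.mk r).getD column "")))
  rw [zip_replicate_min]
  exact this
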